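-- pv_equiv track=rewrite | github.com/Digit4/randoms | antenna.py | st2
-- ===== SOURCE A (Python) =====
-- from math import fabs
--
-- def st2(houses, r):
-- 	for i in range(len(houses)):
-- 		flag = 0
-- 		for j in range(len(houses)):
-- 			if (fabs(houses[j] - houses[i]) > r):
-- 				flag = 1
-- 		if flag != 1:
-- 			return houses[i]
-- ===== SOURCE B (Python) =====
-- def st2(houses, r):
--     if not houses:
--         return None
--     mn = min(houses)
--     mx = max(houses)
--     for h in houses:
--         if mx - h <= r and h - mn <= r:
--             return h
--     return None
-- ===== Notes on version B (the rewrite author's own statement) =====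
-- stated objective: faster
-- what changed: B precomputes the global min and max once and checks each house against [mx-r, mn+r] in a single pass, replacing A's inner scan over all houses for every candidate.
import Mathlib
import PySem

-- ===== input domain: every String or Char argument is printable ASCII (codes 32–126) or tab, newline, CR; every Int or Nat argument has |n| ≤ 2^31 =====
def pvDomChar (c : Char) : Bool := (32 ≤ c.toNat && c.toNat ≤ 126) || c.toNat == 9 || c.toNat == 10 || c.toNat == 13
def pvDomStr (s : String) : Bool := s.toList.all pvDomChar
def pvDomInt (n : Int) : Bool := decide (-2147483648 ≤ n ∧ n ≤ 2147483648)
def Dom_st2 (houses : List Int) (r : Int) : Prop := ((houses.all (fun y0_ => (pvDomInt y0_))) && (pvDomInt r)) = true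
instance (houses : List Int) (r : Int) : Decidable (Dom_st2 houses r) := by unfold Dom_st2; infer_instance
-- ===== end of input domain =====

-- B replaces A's quadratic all-pairs scan with one precomputed min/max and a single interval-membership pass.
-- (fabs on ints bounded by 2^31 is exact in double precision, so the comparison is ported as Int comparison.)

-- ===== PORT A =====
-- inner loop: flag = 0; for j …: if |houses[j]-houses[i]| > r: flag = 1
def st2Flag (houses : List Int) (hi r : Int) : Int :=
  houses.foldl (fun flag hj => if |hj - hi| > r then (1 : Int) else flag) 0

-- outer loop over the houses (i-th element = current head), early return
def st2Loop (houses : List Int) (r : Int) : List Int → Option Int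
  | [] => none
  | h :: t => if st2Flag houses h r ≠ 1 then some h else st2Loop houses r t

def st2 (houses : List Int) (r : Int) : Option Int :=
  st2Loop houses r houses

-- ===== PORT B =====
def st2_alt (houses : List Int) (r : Int) : Option Int :=
  match houses with
  | [] => none
  | h :: t =>
    let mn := t.foldl min h
    let mx := t.foldl max h
    (h :: t).find? (fun x => decide (mx - x ≤ r) && decide (x - mn ≤ r))

-- ===== PRECONDITION & SPEC =====
def Spec_st2 (houses : List Int) (r : Int) (out : Option Int) : Prop := out = st2_alt houses r
instance (houses : List Int) (r : Int) (out : Option Int) : Decidable (Spec_st2 houses r out) := by unfold Spec_st2; infer_instance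

-- ===== CLAIM (what is proved, stated in full; the proofs are below) =====
def Claim_equal_st2 : Prop := ∀ (houses : List Int) (r : Int), Dom_st2 houses r → Spec_st2 houses r (st2 houses r)

-- ===== LEMMAS AND PROOFS =====

theorem st2Flag_aux (hi r : Int) (l : List Int) (a : Int) :
    l.foldl (fun flag hj => if |hj - hi| > r then (1 : Int) else flag) a
      = if l.any (fun hj => decide (|hj - hi| > r)) then 1 else a := by
  induction l generalizing a with
  | nil => simp
  | cons x t ih =>
    simp only [List.foldl_cons, List.any_cons, ih]
    by_cases hx : |x - hi| > r <;> simp [hx]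

theorem st2Flag_eq (houses : List Int) (hi r : Int) :
    st2Flag houses hi r
      = if houses.any (fun hj => decide (|hj - hi| > r)) then 1 else 0 :=
  st2Flag_aux hi r houses 0

theorem foldl_min_le (h : Int) (t : List Int) :
    ∀ x ∈ h :: t, t.foldl min h ≤ x := by
  induction t generalizing h with
  | nil => simp
  | cons y t ih =>
    intro x hx
    simp only [List.mem_cons] at hx
    simp only [List.foldl_cons]
    have hhead : t.foldl min (min h y) ≤ min h y := ih (min h y) (min h y) (by simp)
    rcases hx with h1 | h1 | h1
    · subst h1; exact le_trans hhead (min_le_left _ _)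
    · subst h1; exact le_trans hhead (min_le_right _ _)
    · exact ih (min h y) x (by simp [h1])

theorem foldl_min_mem (h : Int) (t : List Int) :
    t.foldl min h ∈ h :: t := by
  induction t generalizing h with
  | nil => simp
  | cons y t ih =>
    have hmem := ih (min h y)
    simp only [List.foldl_cons]
    rcases min_choice h y with hm | hm <;> rw [hm] at hmem ⊢ <;>
      simp only [List.mem_cons] at hmem ⊢ <;> tauto

theorem le_foldl_max (h : Int) (t : List Int) :
    ∀ x ∈ h :: t, x ≤ t.foldl max h := by
  induction t generalizing h with
  | nil => simp
  | cons y t ih =>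
    intro x hx
    simp only [List.mem_cons] at hx
    simp only [List.foldl_cons]
    have hhead : max h y ≤ t.foldl max (max h y) := ih (max h y) (max h y) (by simp)
    rcases hx with h1 | h1 | h1
    · subst h1; exact le_trans (le_max_left _ _) hhead
    · subst h1; exact le_trans (le_max_right _ _) hhead
    · exact ih (max h y) x (by simp [h1])

theorem foldl_max_mem (h : Int) (t : List Int) :
    t.foldl max h ∈ h :: t := by
  induction t generalizing h with
  | nil => simp
  | cons y t ih =>
    have hmem := ih (max h y)
    simp only [List.foldl_cons]
    rcases max_choice h y with hm | hm <;> rw [hm] at hmem ⊢ <;>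
      simp only [List.mem_cons] at hmem ⊢ <;> tauto

-- the two per-house tests coincide (for any candidate x, given a nonempty house list)
theorem pred_eq (h : Int) (t : List Int) (r x : Int) :
    (decide (st2Flag (h :: t) x r ≠ 1))
      = (decide (t.foldl max h - x ≤ r) && decide (x - t.foldl min h ≤ r)) := by
  by_cases hany : (h :: t).any (fun hj => decide (|hj - x| > r))
  · rw [List.any_eq_true] at hany
    obtain ⟨j, hj, hjf⟩ := hany
    simp only [decide_eq_true_eq] at hjf
    have h1 : st2Flag (h :: t) x r = 1 := by
      have ht : ((h :: t).any (fun hj => decide (|hj - x| > r))) = true :=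
        List.any_eq_true.mpr ⟨j, hj, by simpa using hjf⟩
      rw [st2Flag_eq, ht]
      rfl
    have hjmax := le_foldl_max h t j hj
    have hjmin := foldl_min_le h t j hj
    have hd : r < j - x ∨ r < -(j - x) := lt_abs.mp hjf
    simp only [h1, ne_eq, not_true_eq_false, decide_false]
    have hc : ¬(t.foldl max h - x ≤ r) ∨ ¬(x - t.foldl min h ≤ r) := by omega
    rcases hc with hc | hc <;> simp [hc]
  · have h0 : st2Flag (h :: t) x r = 0 := by rw [st2Flag_eq]; simp [hany]
    rw [List.any_eq_true] at hany
    push_neg at hany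
    have hmx := hany _ (foldl_max_mem h t)
    have hmn := hany _ (foldl_min_mem h t)
    have hmx2 : |t.foldl max h - x| ≤ r := by simpa using hmx
    have hmn2 : |t.foldl min h - x| ≤ r := by simpa using hmn
    rw [abs_le] at hmx2 hmn2
    simp only [h0]
    have h1 : t.foldl max h - x ≤ r := by omega
    have h2 : x - t.foldl min h ≤ r := by omega
    simp [h1, h2]

theorem loop_eq_find (houses : List Int) (r : Int)
    (p : Int → Bool) (hp : ∀ x, decide (st2Flag houses x r ≠ 1) = p x) :
    ∀ l : List Int, st2Loop houses r l = l.find? p := by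
  intro l
  induction l with
  | nil => rfl
  | cons x t ih =>
    simp only [st2Loop, List.find?_cons]
    by_cases hx : st2Flag houses x r ≠ 1
    · have : p x = true := by rw [← hp]; simp [hx]
      simp [hx, this]
    · have : p x = false := by rw [← hp]; simp [hx]
      simp [hx, this, ih]

-- ===== VERDICT (by name: the statement is the Claim_ definition above) =====
theorem st2_spec : Claim_equal_st2 := by
  intro houses r _
  unfold Spec_st2 st2 st2_alt
  match houses with
  | [] => rfl
  | h :: t =>
    exact loop_eq_find (h :: t) r _ (fun x => pred_eq h t r x) (h :: t)
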